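-- pv_equiv track=rewrite | github.com/clementinec/thermBAL | cases/office_topology_compare/build_templates.py | build_walls
-- ===== SOURCE A (Python) =====
-- from typing import Dict, Iterable, List, Set, Tuple
--
-- Coord = Tuple[int, int]
--
-- def build_walls(active_cells: Set[Coord], room_by_cell: Dict[Coord, str], cols: int, rows: int) -> Tuple[List[List[bool]], List[List[bool]]]:
--     h_walls = [[False for _ in range(cols)] for _ in range(rows + 1)]
--     v_walls = [[False for _ in range(cols + 1)] for _ in range(rows)]
--
--     for col, row in active_cells:
--         top = (col, row - 1)
--         bottom = (col, row + 1)
--         left = (col - 1, row)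
--         right = (col + 1, row)
--
--         if top not in active_cells or room_by_cell.get(top) != room_by_cell[(col, row)]:
--             h_walls[row][col] = True
--         if bottom not in active_cells or room_by_cell.get(bottom) != room_by_cell[(col, row)]:
--             h_walls[row + 1][col] = True
--         if left not in active_cells or room_by_cell.get(left) != room_by_cell[(col, row)]:
--             v_walls[row][col] = True
--         if right not in active_cells or room_by_cell.get(right) != room_by_cell[(col, row)]:
--             v_walls[row][col + 1] = True
--
--     return h_walls, v_walls
-- ===== SOURCE B (Python) =====
-- def build_walls(active_cells, room_by_cell, cols, rows):
--     # paint each active cell's room onto a dense grid (a missing room entry gets the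
--     # cell's own coordinate as a unique placeholder), then a wall separates two
--     # adjacent grid cells exactly when their painted values differ
--     cell = [[None] * cols for _ in range(rows)]
--     for col, row in active_cells:
--         cell[row][col] = room_by_cell.get((col, row), (col, row))
--
--     def at(c, r):
--         return cell[r][c] if 0 <= r < rows and 0 <= c < cols else None
--
--     h_walls = [[at(c, r - 1) != at(c, r) for c in range(cols)] for r in range(rows + 1)]
--     v_walls = [[at(c - 1, r) != at(c, r) for c in range(cols + 1)] for r in range(rows)]
--     return h_walls, v_walls
-- ===== Notes on version B (the rewrite author's own statement) =====
-- stated objective: alternative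
-- what changed: Instead of looping over active cells and conditionally stamping four wall slots each (with neighbour membership tests), B paints each active cell's room onto a dense grid once and then derives every wall slot by comparing the two adjacent painted values.
import Mathlib
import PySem

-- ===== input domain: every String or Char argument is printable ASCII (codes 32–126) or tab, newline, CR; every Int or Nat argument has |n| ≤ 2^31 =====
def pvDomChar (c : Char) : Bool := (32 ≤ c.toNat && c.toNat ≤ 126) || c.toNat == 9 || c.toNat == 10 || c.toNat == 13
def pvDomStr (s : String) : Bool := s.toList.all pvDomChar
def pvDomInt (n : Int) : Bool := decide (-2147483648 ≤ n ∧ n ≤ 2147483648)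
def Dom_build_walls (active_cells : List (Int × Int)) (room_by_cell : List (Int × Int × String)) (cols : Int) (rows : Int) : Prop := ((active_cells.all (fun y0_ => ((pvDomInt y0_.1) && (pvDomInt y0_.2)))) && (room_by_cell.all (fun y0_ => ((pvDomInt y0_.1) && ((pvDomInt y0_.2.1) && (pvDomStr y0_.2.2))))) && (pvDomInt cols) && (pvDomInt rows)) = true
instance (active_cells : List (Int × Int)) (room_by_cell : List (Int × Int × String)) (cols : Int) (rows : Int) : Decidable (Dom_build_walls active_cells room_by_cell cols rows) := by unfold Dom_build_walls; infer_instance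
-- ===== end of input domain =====

-- B replaces A's loop over active cells (which conditionally stamps four wall slots each) by
-- painting each cell's room onto a dense grid and then deriving every wall slot by comparing its
-- two adjacent grid values; equivalence is proved on Pre_ (see its comment for what is excluded).

-- ===== PORT A =====
-- room_by_cell[k] / room_by_cell.get(k): first-match association-list lookup (the task's dict
-- convention); Python's `[]` raises KeyError when the key is missing — Pre_ excludes every input
-- on which that lookup is reached with a missing key, so the `none` result is unreachable there.
def pvLookup (d : List (Int × Int × String)) (k : Int × Int) : Option String :=
  match d with
  | [] => none
  | (a, b, s) :: rest => if (a, b) = k then some s else pvLookup rest k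

-- g[r][c] = v with Python's negative-index wrap; an out-of-range index raises IndexError in
-- Python (excluded by Pre_ for both ports), modelled as a no-op here.
def pvSet2 {α : Type} (g : List (List α)) (r c : Int) (v : α) : List (List α) :=
  match PySem.List.pyGet? g r with
  | none => g
  | some row =>
    match PySem.List.pySet? row c v with
    | none => g
    | some row' => (PySem.List.pySet? g r row').getD g

-- the body of A's `for col, row in active_cells` loop (four conditional wall stamps)
def pvStep (active_cells : List (Int × Int)) (room_by_cell : List (Int × Int × String))
    (st : List (List Bool) × List (List Bool)) (cell : Int × Int) :
    List (List Bool) × List (List Bool) :=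
  let c := cell.1
  let r := cell.2
  let hw := st.1
  let vw := st.2
  let hw := if !(PySem.Set.contains active_cells (c, r - 1)) || (pvLookup room_by_cell (c, r - 1) != pvLookup room_by_cell (c, r)) then pvSet2 hw r c true else hw
  let hw := if !(PySem.Set.contains active_cells (c, r + 1)) || (pvLookup room_by_cell (c, r + 1) != pvLookup room_by_cell (c, r)) then pvSet2 hw (r + 1) c true else hw
  let vw := if !(PySem.Set.contains active_cells (c - 1, r)) || (pvLookup room_by_cell (c - 1, r) != pvLookup room_by_cell (c, r)) then pvSet2 vw r c true else vw
  let vw := if !(PySem.Set.contains active_cells (c + 1, r)) || (pvLookup room_by_cell (c + 1, r) != pvLookup room_by_cell (c, r)) then pvSet2 vw r (c + 1) true else vw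
  (hw, vw)

def build_walls (active_cells : List (Int × Int)) (room_by_cell : List (Int × Int × String)) (cols : Int) (rows : Int) : List (List Bool) × List (List Bool) :=
  let h_walls := (PySem.List.pyRange 0 (rows + 1) 1).map (fun _ => (PySem.List.pyRange 0 cols 1).map (fun _ => false))
  let v_walls := (PySem.List.pyRange 0 rows 1).map (fun _ => (PySem.List.pyRange 0 (cols + 1) 1).map (fun _ => false))
  active_cells.foldl (pvStep active_cells room_by_cell) (h_walls, v_walls)

-- ===== PORT B =====
-- a painted grid entry: a room string, or the cell's own coordinate as B's placeholder for an
-- active cell without a room entry (Python's `room_by_cell.get((col, row), (col, row))`)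
def pvPaintVal (room_by_cell : List (Int × Int × String)) (p : Int × Int) : String ⊕ (Int × Int) :=
  match pvLookup room_by_cell p with
  | some s => Sum.inl s
  | none => Sum.inr p

-- B's `at(c, r)`: the guard makes both indices valid on the rows×cols grid, so the fallbacks are
-- unreachable on that grid
def pvAt (g : List (List (Option (String ⊕ (Int × Int))))) (cols rows c r : Int) :
    Option (String ⊕ (Int × Int)) :=
  if 0 ≤ r ∧ r < rows ∧ 0 ≤ c ∧ c < cols then
    match PySem.List.pyGet? g r with
    | some row => (PySem.List.pyGet? row c).getD none
    | none => none
  else none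

def build_walls_alt (active_cells : List (Int × Int)) (room_by_cell : List (Int × Int × String)) (cols : Int) (rows : Int) : List (List Bool) × List (List Bool) :=
  -- `[[None] * cols for _ in range(rows)]`
  let cell0 := (PySem.List.pyRange 0 rows 1).map (fun _ => (PySem.List.pyRange 0 cols 1).map (fun _ => (none : Option (String ⊕ (Int × Int)))))
  let cell := active_cells.foldl (fun g p => pvSet2 g p.2 p.1 (some (pvPaintVal room_by_cell p))) cell0
  ((PySem.List.pyRange 0 (rows + 1) 1).map (fun r => (PySem.List.pyRange 0 cols 1).map (fun c => decide (pvAt cell cols rows c (r - 1) ≠ pvAt cell cols rows c r))),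
   (PySem.List.pyRange 0 rows 1).map (fun r => (PySem.List.pyRange 0 (cols + 1) 1).map (fun c => decide (pvAt cell cols rows (c - 1) r ≠ pvAt cell cols rows c r))))

-- ===== PRECONDITION & SPEC =====
-- Pre_ restricts active cells to the cols×rows grid — the function's natural domain: outside it
-- A either raises IndexError or, for a negative coordinate, returns a grid whose wall marks are
-- wrapped to the opposite edge, a placement B's repainting does not reproduce; Pre_ also excludes
-- the inputs where A raises KeyError (an active cell with an active 4-neighbour missing from
-- room_by_cell).
def Pre_build_walls (active_cells : List (Int × Int)) (room_by_cell : List (Int × Int × String)) (cols : Int) (rows : Int) : Prop :=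
  (∀ p ∈ active_cells, 0 ≤ p.1 ∧ p.1 < cols ∧ 0 ≤ p.2 ∧ p.2 < rows) ∧
  (∀ p ∈ active_cells,
    ((p.1, p.2 - 1) ∈ active_cells ∨ (p.1, p.2 + 1) ∈ active_cells ∨
     (p.1 - 1, p.2) ∈ active_cells ∨ (p.1 + 1, p.2) ∈ active_cells) →
    ∃ e ∈ room_by_cell, (e.1, e.2.1) = p)

instance (active_cells : List (Int × Int)) (room_by_cell : List (Int × Int × String)) (cols : Int) (rows : Int) : Decidable (Pre_build_walls active_cells room_by_cell cols rows) := by unfold Pre_build_walls; infer_instance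

def pvWitness_build_walls : (List (Int × Int)) × (List (Int × Int × String)) × Int × Int :=
  ([(0, 0), (1, 0)], [(0, 0, "a"), (1, 0, "b")], 2, 1)

def Spec_build_walls (active_cells : List (Int × Int)) (room_by_cell : List (Int × Int × String)) (cols : Int) (rows : Int) (out : List (List Bool) × List (List Bool)) : Prop := out = build_walls_alt active_cells room_by_cell cols rows
instance (active_cells : List (Int × Int)) (room_by_cell : List (Int × Int × String)) (cols : Int) (rows : Int) (out : List (List Bool) × List (List Bool)) : Decidable (Spec_build_walls active_cells room_by_cell cols rows out) := by unfold Spec_build_walls; infer_instance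

-- ===== CLAIM (what is proved, stated in full; the proofs are below) =====
def Claim_equal_build_walls : Prop := ∀ (active_cells : List (Int × Int)) (room_by_cell : List (Int × Int × String)) (cols : Int) (rows : Int), Dom_build_walls active_cells room_by_cell cols rows → Pre_build_walls active_cells room_by_cell cols rows → Spec_build_walls active_cells room_by_cell cols rows (build_walls active_cells room_by_cell cols rows)

-- ===== LEMMAS AND PROOFS =====

-- a rectangular grid as the tabulation of a function
def pvGrid {α : Type} (R C : Int) (f : Int → Int → α) : List (List α) :=
  (PySem.List.pyRange 0 R 1).map (fun r => (PySem.List.pyRange 0 C 1).map (fun c => f r c))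

theorem pvGrid_congr {α : Type} {R C : Int} {f g : Int → Int → α}
    (h : ∀ r c, 0 ≤ r → r < R → 0 ≤ c → c < C → f r c = g r c) :
    pvGrid R C f = pvGrid R C g := by
  unfold pvGrid
  refine List.map_congr_left (fun r hr => ?_)
  rw [PySem.List.mem_pyRange_one] at hr
  refine List.map_congr_left (fun c hc => ?_)
  rw [PySem.List.mem_pyRange_one] at hc
  exact h r c hr.1 hr.2 hc.1 hc.2

theorem pvSet2_grid {α : Type} {R C r c : Int} (f : Int → Int → α) (v : α)
    (hr0 : 0 ≤ r) (hrR : r < R) (hc0 : 0 ≤ c) (hcC : c < C) :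
    pvSet2 (pvGrid R C f) r c v
      = pvGrid R C (fun r' c' => if r' = r ∧ c' = c then v else f r' c') := by
  have hlen : (pvGrid R C f).length = (R - 0).toNat := by
    simp [pvGrid, PySem.List.length_pyRange_one]
  have hrn : r.toNat < (pvGrid R C f).length := by rw [hlen]; omega
  have hrr : r = ((r.toNat : Nat) : Int) := (Int.toNat_of_nonneg hr0).symm
  have hcc : c = ((c.toNat : Nat) : Int) := (Int.toNat_of_nonneg hc0).symm
  have hget : PySem.List.pyGet? (pvGrid R C f) r
      = some ((PySem.List.pyRange 0 C 1).map (fun c' => f r c')) := by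
    rw [PySem.List.pyGet?_eq_some_getElem _ hr0 (by rw [hlen]; omega)]
    unfold pvGrid
    rw [List.getElem_map, PySem.List.getElem_pyRange_one]
    rw [show (0 + ((r.toNat : Nat) : Int)) = r by omega]
  have hrowlen : ((PySem.List.pyRange 0 C 1).map (fun c' => f r c')).length = (C - 0).toNat := by
    simp [PySem.List.length_pyRange_one]
  have hset1 : PySem.List.pySet? ((PySem.List.pyRange 0 C 1).map (fun c' => f r c')) c v
      = some (((PySem.List.pyRange 0 C 1).map (fun c' => f r c')).set c.toNat v) := by
    have h := PySem.List.pySet?_natCast ((PySem.List.pyRange 0 C 1).map (fun c' => f r c')) c.toNat v (by rw [hrowlen]; omega)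
    rwa [Int.toNat_of_nonneg hc0] at h
  have hset2 : PySem.List.pySet? (pvGrid R C f) r (((PySem.List.pyRange 0 C 1).map (fun c' => f r c')).set c.toNat v)
      = some ((pvGrid R C f).set r.toNat (((PySem.List.pyRange 0 C 1).map (fun c' => f r c')).set c.toNat v)) := by
    have h := PySem.List.pySet?_natCast (pvGrid R C f) r.toNat (((PySem.List.pyRange 0 C 1).map (fun c' => f r c')).set c.toNat v) hrn
    rwa [Int.toNat_of_nonneg hr0] at h
  simp only [pvSet2, hget, hset1, hset2, Option.getD_some]
  apply List.ext_getElem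
  · simp [pvGrid, PySem.List.length_pyRange_one]
  · intro j hj hj'
    have hjR : (j : Int) < R := by
      simp only [pvGrid, List.length_set, List.length_map, PySem.List.length_pyRange_one] at hj
      omega
    rw [List.getElem_set]
    have hRj : (pvGrid R C (fun r' c' => if r' = r ∧ c' = c then v else f r' c'))[j]'hj'
        = (PySem.List.pyRange 0 C 1).map (fun c' => if (0 + (j : Int)) = r ∧ c' = c then v else f (0 + (j : Int)) c') := by
      unfold pvGrid
      rw [List.getElem_map, PySem.List.getElem_pyRange_one]
    rw [hRj]
    by_cases hjr : r.toNat = j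
    · rw [if_pos hjr]
      have hjr' : (0 + (j : Int)) = r := by omega
      apply List.ext_getElem
      · simp [PySem.List.length_pyRange_one]
      · intro k hk hk'
        simp only [List.getElem_set, List.getElem_map, PySem.List.getElem_pyRange_one]
        by_cases hkc : c.toNat = k
        · rw [if_pos hkc, if_pos (⟨hjr', by omega⟩ : 0 + (j : Int) = r ∧ 0 + (k : Int) = c)]
        · rw [if_neg hkc, if_neg (fun hcon : 0 + (j : Int) = r ∧ 0 + (k : Int) = c => hkc (by omega)), hjr']
    · rw [if_neg hjr]
      unfold pvGrid
      rw [List.getElem_map, PySem.List.getElem_pyRange_one]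
      apply List.map_congr_left
      intro x hx
      rw [if_neg]
      rintro ⟨h1, h2⟩
      exact hjr (by omega)

theorem pvCondMark {R C r c : Int} (f : Int → Int → Bool) (b : Bool)
    (hr0 : 0 ≤ r) (hrR : r < R) (hc0 : 0 ≤ c) (hcC : c < C) :
    (if b then pvSet2 (pvGrid R C f) r c true else pvGrid R C f)
      = pvGrid R C (fun r' c' => (b && (decide (r' = r) && decide (c' = c))) || f r' c') := by
  cases b with
  | false => simp [pvGrid]
  | true =>
    simp only [if_pos]
    rw [pvSet2_grid f true hr0 hrR hc0 hcC]
    refine pvGrid_congr (fun r' c' _ _ _ _ => ?_)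
    by_cases h1 : r' = r <;> by_cases h2 : c' = c <;> simp [h1, h2]

-- horizontal / vertical contribution of one active cell (col, row) to wall slot (r, c)
def pvHContrib (active_cells : List (Int × Int)) (room_by_cell : List (Int × Int × String))
    (p : Int × Int) (r c : Int) : Bool :=
  ((!(PySem.Set.contains active_cells (p.1, p.2 - 1)) || (pvLookup room_by_cell (p.1, p.2 - 1) != pvLookup room_by_cell (p.1, p.2))) && (decide (r = p.2) && decide (c = p.1)))
  || ((!(PySem.Set.contains active_cells (p.1, p.2 + 1)) || (pvLookup room_by_cell (p.1, p.2 + 1) != pvLookup room_by_cell (p.1, p.2))) && (decide (r = p.2 + 1) && decide (c = p.1)))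

def pvVContrib (active_cells : List (Int × Int)) (room_by_cell : List (Int × Int × String))
    (p : Int × Int) (r c : Int) : Bool :=
  ((!(PySem.Set.contains active_cells (p.1 - 1, p.2)) || (pvLookup room_by_cell (p.1 - 1, p.2) != pvLookup room_by_cell (p.1, p.2))) && (decide (r = p.2) && decide (c = p.1)))
  || ((!(PySem.Set.contains active_cells (p.1 + 1, p.2)) || (pvLookup room_by_cell (p.1 + 1, p.2) != pvLookup room_by_cell (p.1, p.2))) && (decide (r = p.2) && decide (c = p.1 + 1)))

theorem pvFold_grids (active_cells : List (Int × Int)) (room_by_cell : List (Int × Int × String))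
    (cols rows : Int) (cells : List (Int × Int))
    (hin : ∀ p ∈ cells, 0 ≤ p.1 ∧ p.1 < cols ∧ 0 ≤ p.2 ∧ p.2 < rows) :
    ∀ f g : Int → Int → Bool,
    cells.foldl (pvStep active_cells room_by_cell) (pvGrid (rows + 1) cols f, pvGrid rows (cols + 1) g)
      = (pvGrid (rows + 1) cols (fun r c => f r c || cells.any (fun p => pvHContrib active_cells room_by_cell p r c)),
         pvGrid rows (cols + 1) (fun r c => g r c || cells.any (fun p => pvVContrib active_cells room_by_cell p r c))) := by
  induction cells with
  | nil => intro f g; simp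
  | cons p rest ih =>
    intro f g
    obtain ⟨pc, pr⟩ := p
    have hp := hin (pc, pr) List.mem_cons_self
    rw [List.foldl_cons]
    simp only [pvStep]
    rw [pvCondMark f _ (by omega) (by omega) (by omega) (by omega)]
    rw [pvCondMark _ _ (by omega : (0:Int) ≤ pr + 1) (by omega : pr + 1 < rows + 1) (by omega : (0:Int) ≤ pc) (by omega : pc < cols)]
    rw [pvCondMark g _ (by omega) (by omega) (by omega) (by omega)]
    rw [pvCondMark _ _ (by omega : (0:Int) ≤ pr) (by omega : pr < rows) (by omega : (0:Int) ≤ pc + 1) (by omega : pc + 1 < cols + 1)]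
    rw [ih (fun q hq => hin q (List.mem_cons_of_mem _ hq))]
    rw [Prod.mk.injEq]
    constructor
    · refine pvGrid_congr (fun r c _ _ _ _ => ?_)
      simp only [List.any_cons, pvHContrib]
      cases f r c <;> simp [Bool.or_comm, Bool.or_assoc]
    · refine pvGrid_congr (fun r c _ _ _ _ => ?_)
      simp only [List.any_cons, pvVContrib]
      cases g r c <;> simp [Bool.or_comm, Bool.or_assoc]

-- painting all active cells onto the empty grid, as a tabulated function
theorem pvPaint_grids (room_by_cell : List (Int × Int × String)) (cols rows : Int)
    (cells : List (Int × Int))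
    (hin : ∀ p ∈ cells, 0 ≤ p.1 ∧ p.1 < cols ∧ 0 ≤ p.2 ∧ p.2 < rows) :
    ∀ f : Int → Int → Option (String ⊕ (Int × Int)),
    cells.foldl (fun g p => pvSet2 g p.2 p.1 (some (pvPaintVal room_by_cell p))) (pvGrid rows cols f)
      = pvGrid rows cols (fun r c => if (c, r) ∈ cells then some (pvPaintVal room_by_cell (c, r)) else f r c) := by
  induction cells with
  | nil => intro f; simp
  | cons p rest ih =>
    intro f
    obtain ⟨pc, pr⟩ := p
    have hp := hin (pc, pr) List.mem_cons_self
    rw [List.foldl_cons,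
      pvSet2_grid f (some (pvPaintVal room_by_cell (pc, pr))) (by omega) (by omega) (by omega) (by omega),
      ih (fun q hq => hin q (List.mem_cons_of_mem _ hq))]
    refine pvGrid_congr (fun r c _ _ _ _ => ?_)
    by_cases hmem : (c, r) ∈ rest
    · rw [if_pos hmem, if_pos (List.mem_cons_of_mem _ hmem)]
    · rw [if_neg hmem]
      by_cases hpq : r = pr ∧ c = pc
      · rw [if_pos hpq, if_pos (by rw [hpq.1, hpq.2]; exact List.mem_cons_self)]
        rw [hpq.1, hpq.2]
      · rw [if_neg hpq, if_neg (by
          intro hm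
          rcases List.mem_cons.mp hm with he | hm'
          · exact hpq ⟨congrArg Prod.snd he, congrArg Prod.fst he⟩
          · exact hmem hm')]

theorem pvAt_grid (cols rows c r : Int) (f : Int → Int → Option (String ⊕ (Int × Int))) :
    pvAt (pvGrid rows cols f) cols rows c r
      = if 0 ≤ r ∧ r < rows ∧ 0 ≤ c ∧ c < cols then f r c else none := by
  unfold pvAt
  by_cases hb : 0 ≤ r ∧ r < rows ∧ 0 ≤ c ∧ c < cols
  · rw [if_pos hb, if_pos hb]
    obtain ⟨hr0, hrR, hc0, hcC⟩ := hb
    have hlen : (pvGrid rows cols f).length = (rows - 0).toNat := by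
      simp [pvGrid, PySem.List.length_pyRange_one]
    have hget : PySem.List.pyGet? (pvGrid rows cols f) r
        = some ((PySem.List.pyRange 0 cols 1).map (fun c' => f r c')) := by
      rw [PySem.List.pyGet?_eq_some_getElem _ hr0 (by rw [hlen]; omega)]
      unfold pvGrid
      rw [List.getElem_map, PySem.List.getElem_pyRange_one]
      rw [show (0 + ((r.toNat : Nat) : Int)) = r by omega]
    have hget2 : PySem.List.pyGet? ((PySem.List.pyRange 0 cols 1).map (fun c' => f r c')) c
        = some (f r c) := by
      rw [PySem.List.pyGet?_eq_some_getElem _ hc0 (by simp [PySem.List.length_pyRange_one]; omega)]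
      rw [List.getElem_map, PySem.List.getElem_pyRange_one]
      rw [show (0 + ((c.toNat : Nat) : Int)) = c by omega]
    simp only [hget, hget2, Option.getD_some]
  · rw [if_neg hb, if_neg hb]

-- the painted-grid value B compares at a cell, as a function of the input
def pvG (active_cells : List (Int × Int)) (room_by_cell : List (Int × Int × String))
    (cols rows c r : Int) : Option (String ⊕ (Int × Int)) :=
  if 0 ≤ r ∧ r < rows ∧ 0 ≤ c ∧ c < cols then
    (if (c, r) ∈ active_cells then some (pvPaintVal room_by_cell (c, r)) else none)
  else none

theorem pvHContrib_iff (active_cells : List (Int × Int)) (room_by_cell : List (Int × Int × String))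
    (p : Int × Int) (r c : Int) :
    pvHContrib active_cells room_by_cell p r c = true ↔
      ((((p.1, p.2 - 1) ∉ active_cells ∨ pvLookup room_by_cell (p.1, p.2 - 1) ≠ pvLookup room_by_cell (p.1, p.2)) ∧ r = p.2 ∧ c = p.1) ∨
       (((p.1, p.2 + 1) ∉ active_cells ∨ pvLookup room_by_cell (p.1, p.2 + 1) ≠ pvLookup room_by_cell (p.1, p.2)) ∧ r = p.2 + 1 ∧ c = p.1)) := by
  simp only [pvHContrib, Bool.or_eq_true, Bool.and_eq_true, decide_eq_true_eq,
    Bool.not_eq_true', Bool.eq_false_iff, ne_eq, PySem.Set.contains_iff, bne_iff_ne]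

theorem pvVContrib_iff (active_cells : List (Int × Int)) (room_by_cell : List (Int × Int × String))
    (p : Int × Int) (r c : Int) :
    pvVContrib active_cells room_by_cell p r c = true ↔
      ((((p.1 - 1, p.2) ∉ active_cells ∨ pvLookup room_by_cell (p.1 - 1, p.2) ≠ pvLookup room_by_cell (p.1, p.2)) ∧ r = p.2 ∧ c = p.1) ∨
       (((p.1 + 1, p.2) ∉ active_cells ∨ pvLookup room_by_cell (p.1 + 1, p.2) ≠ pvLookup room_by_cell (p.1, p.2)) ∧ r = p.2 ∧ c = p.1 + 1)) := by
  simp only [pvVContrib, Bool.or_eq_true, Bool.and_eq_true, decide_eq_true_eq,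
    Bool.not_eq_true', Bool.eq_false_iff, ne_eq, PySem.Set.contains_iff, bne_iff_ne]

theorem pvLookup_isSome {d : List (Int × Int × String)} {k : Int × Int}
    (h : ∃ e ∈ d, (e.1, e.2.1) = k) : ∃ s, pvLookup d k = some s := by
  induction d with
  | nil => rcases h with ⟨e, he, _⟩; cases he
  | cons e rest ih =>
    obtain ⟨a0, b0, s0⟩ := e
    by_cases hk : (a0, b0) = k
    · exact ⟨s0, by simp [pvLookup, hk]⟩
    · have : ∃ e ∈ rest, (e.1, e.2.1) = k := by
        rcases h with ⟨e', he', heq⟩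
        rcases List.mem_cons.mp he' with he0 | hm
        · exact absurd (by rw [he0] at heq; exact heq) hk
        · exact ⟨e', hm, heq⟩
      obtain ⟨s', hs'⟩ := ih this
      exact ⟨s', by simp [pvLookup, hk, hs']⟩

theorem pvG_not_active (active_cells : List (Int × Int)) (room_by_cell : List (Int × Int × String))
    (cols rows : Int) {b : Int × Int} (hb : b ∉ active_cells) :
    pvG active_cells room_by_cell cols rows b.1 b.2 = none := by
  unfold pvG
  by_cases hbnd : 0 ≤ b.2 ∧ b.2 < rows ∧ 0 ≤ b.1 ∧ b.1 < cols
  · rw [if_pos hbnd, if_neg hb]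
  · rw [if_neg hbnd]

theorem pvG_active (active_cells : List (Int × Int)) (room_by_cell : List (Int × Int × String))
    {cols rows : Int} {a : Int × Int}
    (hin : ∀ p ∈ active_cells, 0 ≤ p.1 ∧ p.1 < cols ∧ 0 ≤ p.2 ∧ p.2 < rows)
    (ha : a ∈ active_cells) :
    pvG active_cells room_by_cell cols rows a.1 a.2 = some (pvPaintVal room_by_cell a) := by
  have h := hin a ha
  unfold pvG
  rw [if_pos ⟨h.2.2.1, h.2.2.2, h.1, h.2.1⟩, if_pos ha]

-- for two adjacent cells both active (hence both in the grid and both room_by_cell keys under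
-- Pre_), the painted values differ exactly when the room lookups differ
theorem pvG_both (active_cells : List (Int × Int)) (room_by_cell : List (Int × Int × String))
    {cols rows : Int} {a b : Int × Int}
    (hin : ∀ p ∈ active_cells, 0 ≤ p.1 ∧ p.1 < cols ∧ 0 ≤ p.2 ∧ p.2 < rows)
    (hka : ∃ e ∈ room_by_cell, (e.1, e.2.1) = a) (hkb : ∃ e ∈ room_by_cell, (e.1, e.2.1) = b)
    (ha : a ∈ active_cells) (hb : b ∈ active_cells) :
    decide (pvG active_cells room_by_cell cols rows a.1 a.2 ≠ pvG active_cells room_by_cell cols rows b.1 b.2)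
      = (pvLookup room_by_cell a != pvLookup room_by_cell b) := by
  obtain ⟨sa, hsa⟩ := pvLookup_isSome hka
  obtain ⟨sb, hsb⟩ := pvLookup_isSome hkb
  rw [pvG_active active_cells room_by_cell hin ha, pvG_active active_cells room_by_cell hin hb]
  unfold pvPaintVal
  rw [hsa, hsb, Bool.eq_iff_iff]
  simp [bne_iff_ne]

theorem pvG_one (active_cells : List (Int × Int)) (room_by_cell : List (Int × Int × String))
    {cols rows : Int} {a b : Int × Int}
    (hin : ∀ p ∈ active_cells, 0 ≤ p.1 ∧ p.1 < cols ∧ 0 ≤ p.2 ∧ p.2 < rows)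
    (ha : a ∈ active_cells) (hb : b ∉ active_cells) :
    decide (pvG active_cells room_by_cell cols rows a.1 a.2 ≠ pvG active_cells room_by_cell cols rows b.1 b.2) = true := by
  rw [pvG_active active_cells room_by_cell hin ha, pvG_not_active active_cells room_by_cell cols rows hb]
  simp

theorem pvG_none (active_cells : List (Int × Int)) (room_by_cell : List (Int × Int × String))
    {cols rows : Int} {a b : Int × Int}
    (ha : a ∉ active_cells) (hb : b ∉ active_cells) :
    decide (pvG active_cells room_by_cell cols rows a.1 a.2 ≠ pvG active_cells room_by_cell cols rows b.1 b.2) = false := by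
  rw [pvG_not_active active_cells room_by_cell cols rows ha, pvG_not_active active_cells room_by_cell cols rows hb]
  simp

theorem pvH_pointwise (active_cells : List (Int × Int)) (room_by_cell : List (Int × Int × String))
    {cols rows : Int}
    (hin : ∀ p ∈ active_cells, 0 ≤ p.1 ∧ p.1 < cols ∧ 0 ≤ p.2 ∧ p.2 < rows)
    (hkey : ∀ p ∈ active_cells,
      ((p.1, p.2 - 1) ∈ active_cells ∨ (p.1, p.2 + 1) ∈ active_cells ∨
       (p.1 - 1, p.2) ∈ active_cells ∨ (p.1 + 1, p.2) ∈ active_cells) →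
      ∃ e ∈ room_by_cell, (e.1, e.2.1) = p)
    (r c : Int) :
    (active_cells.any (fun p => pvHContrib active_cells room_by_cell p r c))
      = decide (pvG active_cells room_by_cell cols rows c (r - 1) ≠ pvG active_cells room_by_cell cols rows c r) := by
  by_cases h1 : (c, r - 1) ∈ active_cells <;> by_cases h2 : (c, r) ∈ active_cells
  · have hka : ∃ e ∈ room_by_cell, (e.1, e.2.1) = (c, r - 1) :=
      hkey (c, r - 1) h1 (Or.inr (Or.inl (by rw [show r - 1 + 1 = r from by omega]; exact h2)))
    have hkb : ∃ e ∈ room_by_cell, (e.1, e.2.1) = (c, r) := hkey (c, r) h2 (Or.inl h1)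
    rw [pvG_both active_cells room_by_cell hin hka hkb h1 h2, Bool.eq_iff_iff,
      List.any_eq_true, bne_iff_ne]
    constructor
    · rintro ⟨⟨p1, p2⟩, hp, hcase⟩
      rw [pvHContrib_iff] at hcase
      rcases hcase with ⟨hcond, hr, hc⟩ | ⟨hcond, hr, hc⟩ <;> subst hc
      · subst hr
        rcases hcond with hna | hne
        · exact absurd h1 hna
        · exact hne
      · have hp2 : p2 = r - 1 := by omega
        subst hp2
        rw [show r - 1 + 1 = r from by omega] at hcond
        rcases hcond with hna | hne
        · exact absurd h2 hna
        · exact fun h => hne h.symm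
    · intro hne
      exact ⟨(c, r), h2, (pvHContrib_iff _ _ _ _ _).mpr (Or.inl ⟨Or.inr hne, rfl, rfl⟩)⟩
  · rw [pvG_one active_cells room_by_cell hin h1 h2, Bool.eq_iff_iff]
    simp only [List.any_eq_true, iff_true]
    exact ⟨(c, r - 1), h1, (pvHContrib_iff _ _ _ _ _).mpr
      (Or.inr ⟨Or.inl (by rw [show r - 1 + 1 = r from by omega]; exact h2), by omega, rfl⟩)⟩
  · rw [show decide (pvG active_cells room_by_cell cols rows c (r - 1) ≠ pvG active_cells room_by_cell cols rows c r)
        = decide (pvG active_cells room_by_cell cols rows c r ≠ pvG active_cells room_by_cell cols rows c (r - 1)) from by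
      simp [ne_comm],
      pvG_one active_cells room_by_cell hin h2 h1, Bool.eq_iff_iff]
    simp only [List.any_eq_true, iff_true]
    exact ⟨(c, r), h2, (pvHContrib_iff _ _ _ _ _).mpr (Or.inl ⟨Or.inl h1, rfl, rfl⟩)⟩
  · rw [pvG_none active_cells room_by_cell h1 h2, Bool.eq_iff_iff]
    simp only [List.any_eq_true, Bool.false_eq_true, iff_false, not_exists]
    rintro ⟨p1, p2⟩ ⟨hp, hcase⟩
    rw [pvHContrib_iff] at hcase
    rcases hcase with ⟨hcond, hr, hc⟩ | ⟨hcond, hr, hc⟩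
    · exact h2 (by rw [hc, hr]; exact hp)
    · exact h1 (by rw [hc, show r - 1 = p2 from by omega]; exact hp)

theorem pvV_pointwise (active_cells : List (Int × Int)) (room_by_cell : List (Int × Int × String))
    {cols rows : Int}
    (hin : ∀ p ∈ active_cells, 0 ≤ p.1 ∧ p.1 < cols ∧ 0 ≤ p.2 ∧ p.2 < rows)
    (hkey : ∀ p ∈ active_cells,
      ((p.1, p.2 - 1) ∈ active_cells ∨ (p.1, p.2 + 1) ∈ active_cells ∨
       (p.1 - 1, p.2) ∈ active_cells ∨ (p.1 + 1, p.2) ∈ active_cells) →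
      ∃ e ∈ room_by_cell, (e.1, e.2.1) = p)
    (r c : Int) :
    (active_cells.any (fun p => pvVContrib active_cells room_by_cell p r c))
      = decide (pvG active_cells room_by_cell cols rows (c - 1) r ≠ pvG active_cells room_by_cell cols rows c r) := by
  by_cases h1 : (c - 1, r) ∈ active_cells <;> by_cases h2 : (c, r) ∈ active_cells
  · have hka : ∃ e ∈ room_by_cell, (e.1, e.2.1) = (c - 1, r) :=
      hkey (c - 1, r) h1 (Or.inr (Or.inr (Or.inr (by rw [show c - 1 + 1 = c from by omega]; exact h2))))
    have hkb : ∃ e ∈ room_by_cell, (e.1, e.2.1) = (c, r) := hkey (c, r) h2 (Or.inr (Or.inr (Or.inl h1)))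
    rw [pvG_both active_cells room_by_cell hin hka hkb h1 h2, Bool.eq_iff_iff,
      List.any_eq_true, bne_iff_ne]
    constructor
    · rintro ⟨⟨p1, p2⟩, hp, hcase⟩
      rw [pvVContrib_iff] at hcase
      rcases hcase with ⟨hcond, hr, hc⟩ | ⟨hcond, hr, hc⟩ <;> subst hr
      · subst hc
        rcases hcond with hna | hne
        · exact absurd h1 hna
        · exact hne
      · have hp1 : p1 = c - 1 := by omega
        subst hp1
        rw [show c - 1 + 1 = c from by omega] at hcond
        rcases hcond with hna | hne
        · exact absurd h2 hna
        · exact fun h => hne h.symm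
    · intro hne
      exact ⟨(c, r), h2, (pvVContrib_iff _ _ _ _ _).mpr (Or.inl ⟨Or.inr hne, rfl, rfl⟩)⟩
  · rw [pvG_one active_cells room_by_cell hin h1 h2, Bool.eq_iff_iff]
    simp only [List.any_eq_true, iff_true]
    exact ⟨(c - 1, r), h1, (pvVContrib_iff _ _ _ _ _).mpr
      (Or.inr ⟨Or.inl (by rw [show c - 1 + 1 = c from by omega]; exact h2), rfl, by omega⟩)⟩
  · rw [show decide (pvG active_cells room_by_cell cols rows (c - 1) r ≠ pvG active_cells room_by_cell cols rows c r)
        = decide (pvG active_cells room_by_cell cols rows c r ≠ pvG active_cells room_by_cell cols rows (c - 1) r) from by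
      simp [ne_comm],
      pvG_one active_cells room_by_cell hin h2 h1, Bool.eq_iff_iff]
    simp only [List.any_eq_true, iff_true]
    exact ⟨(c, r), h2, (pvVContrib_iff _ _ _ _ _).mpr (Or.inl ⟨Or.inl h1, rfl, rfl⟩)⟩
  · rw [pvG_none active_cells room_by_cell h1 h2, Bool.eq_iff_iff]
    simp only [List.any_eq_true, Bool.false_eq_true, iff_false, not_exists]
    rintro ⟨p1, p2⟩ ⟨hp, hcase⟩
    rw [pvVContrib_iff] at hcase
    rcases hcase with ⟨hcond, hr, hc⟩ | ⟨hcond, hr, hc⟩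
    · exact h2 (by rw [hc, hr]; exact hp)
    · exact h1 (by rw [show c - 1 = p1 from by omega, hr]; exact hp)

-- ===== VERDICT (by name: the statement is the Claim_ definition above) =====
theorem build_walls_spec : Claim_equal_build_walls := by
  intro active_cells room_by_cell cols rows _ hpre
  unfold Spec_build_walls build_walls build_walls_alt
  dsimp only
  have h0 : (PySem.List.pyRange 0 (rows + 1) 1).map (fun _ => (PySem.List.pyRange 0 cols 1).map (fun _ => false)) = pvGrid (rows + 1) cols (fun _ _ => false) := rfl
  have v0 : (PySem.List.pyRange 0 rows 1).map (fun _ => (PySem.List.pyRange 0 (cols + 1) 1).map (fun _ => false)) = pvGrid rows (cols + 1) (fun _ _ => false) := rfl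
  have c0 : (PySem.List.pyRange 0 rows 1).map (fun _ => (PySem.List.pyRange 0 cols 1).map (fun _ => (none : Option (String ⊕ (Int × Int))))) = pvGrid rows cols (fun _ _ => (none : Option (String ⊕ (Int × Int)))) := rfl
  rw [h0, v0, c0, pvFold_grids active_cells room_by_cell cols rows active_cells hpre.1,
    pvPaint_grids room_by_cell cols rows active_cells hpre.1]
  have hA : ∀ c r : Int,
      pvAt (pvGrid rows cols (fun r c => if (c, r) ∈ active_cells then some (pvPaintVal room_by_cell (c, r)) else none)) cols rows c r
        = pvG active_cells room_by_cell cols rows c r := by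
    intro c r
    rw [pvAt_grid]
    rfl
  simp only [hA]
  rw [Prod.mk.injEq]
  exact ⟨pvGrid_congr (fun r c _ _ _ _ => by
      rw [Bool.false_or, pvH_pointwise active_cells room_by_cell hpre.1 hpre.2 r c]),
    pvGrid_congr (fun r c _ _ _ _ => by
      rw [Bool.false_or, pvV_pointwise active_cells room_by_cell hpre.1 hpre.2 r c])⟩
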